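-- pv_equiv track=rewrite | github.com/JeremySun1224/SDNetLearning | sdnet/Utils/CoQAPreprocess.py | find_span
-- ===== SOURCE A (Python) =====
-- def find_span(offsets, start, end):
--     start_index = -1
--     end_index = -1
--     for i, offset in enumerate(offsets):
--         if (start_index < 0) or (start >= offset[0]):
--             start_index = i
--         if (end_index < 0) and (end <= offset[1]):
--             end_index = i
--     return (start_index, end_index)
-- ===== SOURCE B (Python) =====
-- def find_span(offsets, start, end):
--     if not offsets:
--         return (-1, -1)
--     start_index = 0
--     for i, offset in reversed(list(enumerate(offsets))):
--         if start >= offset[0]: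
--             start_index = i
--             break
--     end_index = -1
--     for i, offset in enumerate(offsets):
--         if end <= offset[1]:
--             end_index = i
--             break
--     return (start_index, end_index)
-- ===== Notes on version B (the rewrite author's own statement) =====
-- stated objective: alternative
-- what changed: Replaces A's single stateful pass maintaining two accumulators with two independent early-exit searches: a reversed scan finds the last token whose start offset covers `start`, a forward scan finds the first token whose end offset covers `end`.
import Mathlib
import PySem

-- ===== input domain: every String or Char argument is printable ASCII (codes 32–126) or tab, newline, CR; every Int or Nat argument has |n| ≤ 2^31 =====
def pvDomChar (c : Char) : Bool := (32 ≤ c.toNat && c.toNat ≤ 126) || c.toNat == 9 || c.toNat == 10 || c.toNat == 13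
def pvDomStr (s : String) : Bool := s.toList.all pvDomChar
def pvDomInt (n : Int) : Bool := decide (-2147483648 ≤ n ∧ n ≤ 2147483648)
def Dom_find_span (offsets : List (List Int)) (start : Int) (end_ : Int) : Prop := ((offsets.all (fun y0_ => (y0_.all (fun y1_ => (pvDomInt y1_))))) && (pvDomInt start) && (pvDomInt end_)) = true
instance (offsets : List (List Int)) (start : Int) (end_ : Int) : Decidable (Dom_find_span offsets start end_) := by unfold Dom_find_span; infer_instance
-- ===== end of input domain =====

-- B replaces A's single stateful pass by two independent early-exit scans (reversed for
-- start_index, forward for end_index); same O(n) cost, alternative decomposition.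

-- shared helper: Python's row[j] (value only; raising inputs are outside Pre_)
def pvGet (o : List Int) (j : Int) : Int := (PySem.List.pyGet? o j).getD 0

-- ===== PORT A =====
def find_span (offsets : List (List Int)) (start : Int) (end_ : Int) : List Int :=
  let r := (PySem.List.enumerate offsets).foldl
    (fun (acc : Int × Int) (p : Int × List Int) =>
      (if acc.1 < 0 ∨ start ≥ pvGet p.2 0 then p.1 else acc.1,
       if acc.2 < 0 ∧ end_ ≤ pvGet p.2 1 then p.1 else acc.2))
    (-1, -1)
  [r.1, r.2]

-- ===== PORT B =====
def find_span_alt (offsets : List (List Int)) (start : Int) (end_ : Int) : List Int :=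
  if offsets.isEmpty then [-1, -1] else
  let si : Int :=
    match (PySem.List.enumerate offsets).reverse.find? (fun p => decide (start ≥ pvGet p.2 0)) with
    | some p => p.1
    | none => 0
  let ei : Int :=
    match (PySem.List.enumerate offsets).find? (fun p => decide (end_ ≤ pvGet p.2 1)) with
    | some p => p.1
    | none => -1
  [si, ei]

-- ===== PRECONDITION & SPEC =====
-- Pre_ excludes exactly the inputs on which Python A raises IndexError: a row shorter than
-- the subscripts A's loop actually reads (row [0] is read at every index ≥ 1, row [1] is
-- read until some earlier row's [1] has covered end_).
def Pre_find_span (offsets : List (List Int)) (start : Int) (end_ : Int) : Prop :=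
  ∀ i < offsets.length, 1 ≤ (offsets.getD i []).length ∧
    ((offsets.getD i []).length = 1 →
      ∃ j < i, 2 ≤ (offsets.getD j []).length ∧ end_ ≤ (offsets.getD j []).getD 1 0)
instance (offsets : List (List Int)) (start : Int) (end_ : Int) : Decidable (Pre_find_span offsets start end_) := by unfold Pre_find_span; infer_instance
def pvWitness_find_span : List (List Int) × Int × Int := ([[0, 2], [3, 5]], 1, 4)

def Spec_find_span (offsets : List (List Int)) (start : Int) (end_ : Int) (out : List Int) : Prop := out = find_span_alt offsets start end_
instance (offsets : List (List Int)) (start : Int) (end_ : Int) (out : List Int) : Decidable (Spec_find_span offsets start end_ out) := by unfold Spec_find_span; infer_instance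

-- ===== CLAIM (what is proved, stated in full; the proofs are below) =====
def Claim_equal_find_span : Prop := ∀ (offsets : List (List Int)) (start : Int) (end_ : Int), Dom_find_span offsets start end_ → Pre_find_span offsets start end_ → Spec_find_span offsets start end_ (find_span offsets start end_)

-- ===== LEMMAS AND PROOFS =====

-- A's pair fold is the pair of the two component folds
theorem pv_foldl_prod (P Q : Int × List Int → Prop) [DecidablePred P] [DecidablePred Q]
    (l : List (Int × List Int)) (a b : Int) :
    l.foldl (fun acc p => (if acc.1 < 0 ∨ P p then p.1 else acc.1,
                           if acc.2 < 0 ∧ Q p then p.1 else acc.2)) (a, b)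
      = (l.foldl (fun acc p => if acc < 0 ∨ P p then p.1 else acc) a,
         l.foldl (fun acc p => if acc < 0 ∧ Q p then p.1 else acc) b) := by
  induction l generalizing a b with
  | nil => rfl
  | cons x t ih => simp [List.foldl, ih]

-- A's end_index fold computes the first match (all indices nonnegative)
theorem pv_end_fold (q : Int × List Int → Prop) [DecidablePred q] :
    ∀ (el : List (Int × List Int)) (e : Int), (∀ x ∈ el, 0 ≤ x.1) →
      el.foldl (fun acc x => if acc < 0 ∧ q x then x.1 else acc) e
        = if e < 0 then (match el.find? (fun x => decide (q x)) with | some x => x.1 | none => e) else e := by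
  intro el
  induction el with
  | nil => intro e _; by_cases he : e < 0 <;> simp [List.foldl, he]
  | cons x t ih =>
    intro e hx
    have hx0 : 0 ≤ x.1 := hx x (List.mem_cons_self ..)
    have hxt : ∀ y ∈ t, 0 ≤ y.1 := fun y hy => hx y (List.mem_cons_of_mem _ hy)
    by_cases he : e < 0
    · by_cases hq : q x
      · have : ¬ (x.1 < 0) := by omega
        simp [List.foldl, he, hq, ih _ hxt, this, List.find?]
      · simp [List.foldl, he, hq, ih _ hxt, List.find?]
    · simp [List.foldl, ih _ hxt, he]

-- A's start_index fold from a nonnegative accumulator computes the last match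
theorem pv_start_fold (q : Int × List Int → Prop) [DecidablePred q] :
    ∀ (el : List (Int × List Int)) (c : Int), 0 ≤ c → (∀ x ∈ el, 0 ≤ x.1) →
      el.foldl (fun acc x => if acc < 0 ∨ q x then x.1 else acc) c
        = match el.reverse.find? (fun x => decide (q x)) with | some x => x.1 | none => c := by
  intro el
  induction el with
  | nil => intro c _ _; rfl
  | cons x t ih =>
    intro c hc hx
    have hx0 : 0 ≤ x.1 := hx x (List.mem_cons_self ..)
    have hxt : ∀ y ∈ t, 0 ≤ y.1 := fun y hy => hx y (List.mem_cons_of_mem _ hy)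
    have hnc : ¬ (c < 0) := by omega
    have step : List.foldl (fun acc x => if acc < 0 ∨ q x then x.1 else acc) c (x :: t)
        = List.foldl (fun acc x => if acc < 0 ∨ q x then x.1 else acc) (if q x then x.1 else c) t := by
      by_cases hq : q x <;> simp [List.foldl, hnc, hq]
    have hc' : 0 ≤ (if q x then x.1 else c) := by split <;> assumption
    rw [step, ih _ hc' hxt]
    rw [List.reverse_cons, List.find?_append]
    cases h : t.reverse.find? (fun x => decide (q x)) with
    | some y => simp
    | none => by_cases hq : q x <;> simp [List.find?, hq]

-- every index produced by enumerate offsets (from 0) is nonnegative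
theorem pv_enum_nonneg (offsets : List (List Int)) :
    ∀ x ∈ PySem.List.enumerate offsets, 0 ≤ x.1 := by
  intro x hx
  rcases (PySem.List.mem_enumerate_iff _ _ _).1 hx with ⟨k, hk, rfl⟩
  simp

-- ===== VERDICT (by name: the statement is the Claim_ definition above) =====
theorem find_span_spec : Claim_equal_find_span := by
  intro offsets start end_ _ _
  unfold Spec_find_span find_span find_span_alt
  dsimp only
  rw [pv_foldl_prod]
  cases offsets with
  | nil => rfl
  | cons o os =>
    simp only [List.isEmpty_cons, if_neg (by simp : ¬ (false = true))]
    have henum : PySem.List.enumerate (o :: os) = (0, o) :: PySem.List.enumerate os 1 := by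
      simp [PySem.List.enumerate_cons]
    have hnn := pv_enum_nonneg (o :: os)
    rw [henum] at hnn ⊢
    have hnnt : ∀ x ∈ PySem.List.enumerate os 1, 0 ≤ x.1 :=
      fun y hy => hnn y (List.mem_cons_of_mem _ hy)
    -- end component
    have hend := pv_end_fold (fun x => end_ ≤ pvGet x.2 1)
      ((0, o) :: PySem.List.enumerate os 1) (-1) hnn
    -- start component: the first step always sets the accumulator to 0
    have hstart0 : List.foldl (fun acc (x : Int × List Int) => if acc < 0 ∨ start ≥ pvGet x.2 0 then x.1 else acc)
        (-1) ((0, o) :: PySem.List.enumerate os 1)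
        = List.foldl (fun acc (x : Int × List Int) => if acc < 0 ∨ start ≥ pvGet x.2 0 then x.1 else acc)
        0 (PySem.List.enumerate os 1) := by
      simp [List.foldl]
    have hstart := pv_start_fold (fun x => start ≥ pvGet x.2 0)
      (PySem.List.enumerate os 1) 0 (le_refl 0) hnnt
    rw [hend, hstart0, hstart]
    rw [List.reverse_cons, List.find?_append]
    cases h : (PySem.List.enumerate os 1).reverse.find? (fun x => decide (start ≥ pvGet x.2 0)) with
    | some y => simp
    | none => by_cases hq : start ≥ pvGet (0, o).2 0 <;> simp [List.find?, hq]
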